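-- pv_equiv track=rewrite | github.com/bmartin9/NIRVAR | models/simulation_studies/bias/0.3-restricted-bias.py | get_nonzero_index_inverse
-- ===== SOURCE A (Python) =====
-- def get_nonzero_index_inverse(v,j):
--     count = 0
--     return_index = 0
--     for i in range(len(v)):
--         if v[i]!=0:
--             count+=1
--             if count == j+1:
--                 return_index = i
--                 break
--     return return_index
-- ===== SOURCE B (Python) =====
-- def get_nonzero_index_inverse(v, j):
--     nz = [i for i, x in enumerate(v) if x != 0]
--     if 0 <= j < len(nz):
--         return nz[j]
--     return 0
-- ===== Notes on version B (the rewrite author's own statement) =====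
-- stated objective: simpler
-- what changed: B builds the full list of nonzero positions once and answers by a bounds-checked table lookup, instead of A's counter-with-early-break scan over indices.
import Mathlib
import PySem

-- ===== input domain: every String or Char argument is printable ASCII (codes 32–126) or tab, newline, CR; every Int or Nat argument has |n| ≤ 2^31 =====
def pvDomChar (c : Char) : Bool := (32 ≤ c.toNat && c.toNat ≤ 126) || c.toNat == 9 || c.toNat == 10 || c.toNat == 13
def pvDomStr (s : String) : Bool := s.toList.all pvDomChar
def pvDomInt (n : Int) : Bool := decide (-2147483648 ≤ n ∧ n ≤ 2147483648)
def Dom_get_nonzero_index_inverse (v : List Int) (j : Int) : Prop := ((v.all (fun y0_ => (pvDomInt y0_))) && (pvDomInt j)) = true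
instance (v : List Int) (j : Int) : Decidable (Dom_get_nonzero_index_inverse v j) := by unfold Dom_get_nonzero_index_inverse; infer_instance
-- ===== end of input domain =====

-- B: build the nonzero-position table once and do a bounds-checked lookup (simpler decomposition than A's counter-with-break scan).
-- ===== PORT A =====
-- loop body of A: current index i, running count c; break (return i) when c+1 = j+1, else continue
def pvA_loop (j : Int) : List Int → Int → Nat → Int
  | [], _, _ => 0
  | x :: rest, c, i =>
    if x ≠ 0 then
      if c + 1 = j + 1 then (i : Int) else pvA_loop j rest (c + 1) (i + 1)
    else pvA_loop j rest c (i + 1)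

def get_nonzero_index_inverse (v : List Int) (j : Int) : Int := pvA_loop j v 0 0

-- ===== PORT B =====
-- nz = [i for i, x in enumerate(v) if x != 0]
def pvNz (v : List Int) (i : Nat) : List Nat :=
  ((v.zipIdx i).filter (fun p => p.1 ≠ 0)).map (·.2)

def get_nonzero_index_inverse_alt (v : List Int) (j : Int) : Int :=
  let nz := pvNz v 0
  if 0 ≤ j ∧ j < (nz.length : Int) then ((nz[j.toNat]?).getD 0 : Nat) else 0

-- ===== PRECONDITION & SPEC =====
def Spec_get_nonzero_index_inverse (v : List Int) (j : Int) (out : Int) : Prop := out = get_nonzero_index_inverse_alt v j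
instance (v : List Int) (j : Int) (out : Int) : Decidable (Spec_get_nonzero_index_inverse v j out) := by unfold Spec_get_nonzero_index_inverse; infer_instance

-- ===== CLAIM (what is proved, stated in full; the proofs are below) =====
def Claim_equal_get_nonzero_index_inverse : Prop := ∀ (v : List Int) (j : Int), Dom_get_nonzero_index_inverse v j → Spec_get_nonzero_index_inverse v j (get_nonzero_index_inverse v j)

-- ===== LEMMAS AND PROOFS =====



lemma pvNz_cons (x : Int) (rest : List Int) (i : Nat) :
    pvNz (x :: rest) i = if x = 0 then pvNz rest (i+1) else i :: pvNz rest (i+1) := by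
  by_cases hx : x = 0 <;> simp [pvNz, hx]

lemma pvA_loop_eq (j : Int) (v : List Int) (c : Int) (i : Nat) :
    pvA_loop j v c i =
      (if 0 ≤ j - c ∧ j - c < ((pvNz v i).length : Int)
       then (((pvNz v i)[(j - c).toNat]?).getD 0 : Nat) else 0) := by
  induction v generalizing c i with
  | nil => simp [pvA_loop, pvNz]
  | cons x rest ih =>
    rw [pvNz_cons]
    by_cases hx : x = 0
    · rw [if_pos hx, show pvA_loop j (x :: rest) c i = pvA_loop j rest c (i+1) from by
        simp [pvA_loop, hx]]
      exact ih c (i+1)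
    · rw [if_neg hx]
      by_cases hc : c + 1 = j + 1
      · have hj : j - c = 0 := by omega
        rw [show pvA_loop j (x :: rest) c i = (i : Int) from by simp [pvA_loop, hx, hc]]
        rw [if_pos ⟨by omega, by simp; omega⟩]
        simp [hj]
      · rw [show pvA_loop j (x :: rest) c i = pvA_loop j rest (c+1) (i+1) from by
          simp [pvA_loop, hx, hc]]
        rw [ih]
        rcases lt_or_gt_of_ne (show j ≠ c by omega) with h | h
        · rw [if_neg (by omega), if_neg (by intro hh; omega)]
        · have ht : (j - c).toNat = (j - (c+1)).toNat + 1 := by omega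
          by_cases hlt : j - (c+1) < ((pvNz rest (i+1)).length : Int)
          · rw [if_pos ⟨by omega, hlt⟩, if_pos ⟨by omega, by simp; omega⟩]
            simp [ht]
          · rw [if_neg (fun hh => hlt hh.2), if_neg (by intro hh; apply hlt; simp at hh; omega)]

theorem get_nonzero_index_inverse_spec : Claim_equal_get_nonzero_index_inverse := by
  intro v j _
  unfold Spec_get_nonzero_index_inverse get_nonzero_index_inverse get_nonzero_index_inverse_alt
  rw [pvA_loop_eq]
  simp
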